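-- pv_equiv track=rewrite | github.com/eerytea/d20-fight-club | engine/grid.py | _spread_rows
-- ===== SOURCE A (Python) =====
-- from typing import Dict, List, Tuple, Iterable
--
-- def _spread_rows(n: int, height: int) -> List[int]:
--     """
--     Returns a list of 'n' distinct row indices (0..height-1) spread as evenly as possible,
--     centered around the middle rows. Deterministic for test stability.
--     """
--     if n <= 0:
--         return []
--     rows = list(range(height))
--     mid = height // 2
--     order: List[int] = []
--     i = 0
--     while len(order) < height:
--         a = mid - i
--         b = mid + i
--         if 0 <= a < height:
--             order.append(a)
--         if b != a and 0 <= b < height: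
--             order.append(b)
--         i += 1
--     return order[:n]
-- ===== SOURCE B (Python) =====
-- def _spread_rows(n: int, height: int) -> list:
--     if n <= 0:
--         return []
--     mid = height // 2
--     # distance from mid first; within a distance the left row (mid-d) precedes the right (mid+d)
--     return sorted(range(height), key=lambda r: 2 * abs(r - mid) - (r <= mid))[:n]
-- ===== Notes on version B (the rewrite author's own statement) =====
-- stated objective: simpler
-- what changed: A's centre-out while loop with two conditional appends per iteration is replaced by one sorted() call over range(height) with an integer distance-from-middle key (2*abs(r-mid) - (r<=mid)), sliced to n.
import Mathlib
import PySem

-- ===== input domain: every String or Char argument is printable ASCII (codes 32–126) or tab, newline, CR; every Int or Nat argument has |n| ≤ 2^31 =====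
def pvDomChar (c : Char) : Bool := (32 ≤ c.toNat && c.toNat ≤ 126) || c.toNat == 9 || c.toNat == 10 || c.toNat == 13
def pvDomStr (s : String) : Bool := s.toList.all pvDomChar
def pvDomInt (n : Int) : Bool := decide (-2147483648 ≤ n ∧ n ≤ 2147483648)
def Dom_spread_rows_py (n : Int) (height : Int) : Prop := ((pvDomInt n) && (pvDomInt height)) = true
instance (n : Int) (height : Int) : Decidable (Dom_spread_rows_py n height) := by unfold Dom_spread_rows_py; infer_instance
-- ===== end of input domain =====

-- B replaces A's centre-out while loop by a single sort of range(height) with an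
-- integer distance-from-middle key, sliced to n (objective: simpler).

-- ===== PORT A =====
-- one pass of the while-loop body: the two conditional appends
def spreadStep (mid height : Int) (order : List Int) (i : Int) : List Int :=
  let a := mid - i
  let b := mid + i
  let order := if 0 ≤ a ∧ a < height then order ++ [a] else order
  if b ≠ a ∧ 0 ≤ b ∧ b < height then order ++ [b] else order

-- the while loop; fuel only guarantees termination (height iterations always suffice)
def spreadLoop (mid height : Int) : Nat → List Int → Int → List Int
  | 0, order, _ => order
  | fuel+1, order, i =>
    if (order.length : Int) < height then
      spreadLoop mid height fuel (spreadStep mid height order i) (i + 1)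
    else order

def spread_rows_py (n : Int) (height : Int) : List Int :=
  if n ≤ 0 then []
  else
    let _rows := PySem.List.pyRange 0 height 1
    let mid := PySem.Int.floordiv height 2
    let order := spreadLoop mid height height.toNat [] 0
    PySem.List.slice order none (some n)

-- ===== PORT B =====
def spread_rows_py_alt (n : Int) (height : Int) : List Int :=
  if n ≤ 0 then []
  else
    let mid := PySem.Int.floordiv height 2
    PySem.List.slice
      (PySem.List.sorted (PySem.List.pyRange 0 height 1)
        (fun r => 2 * |r - mid| - (if r ≤ mid then 1 else 0)) false)
      none (some n)

-- ===== PRECONDITION & SPEC =====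
def Spec_spread_rows_py (n : Int) (height : Int) (out : List Int) : Prop := out = spread_rows_py_alt n height
instance (n : Int) (height : Int) (out : List Int) : Decidable (Spec_spread_rows_py n height out) := by unfold Spec_spread_rows_py; infer_instance

-- ===== CLAIM (what is proved, stated in full; the proofs are below) =====
def Claim_equal_spread_rows_py : Prop := ∀ (n : Int) (height : Int), Dom_spread_rows_py n height → Spec_spread_rows_py n height (spread_rows_py n height)

-- ===== LEMMAS AND PROOFS =====

-- B's sort key
def pvKey (mid r : Int) : Int := 2 * |r - mid| - (if r ≤ mid then 1 else 0)

-- the elements appended by iteration j of A's loop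
def pvSeg (mid height : Int) (j : Nat) : List Int :=
  (if 0 ≤ mid - (j : Int) ∧ mid - (j : Int) < height then [mid - (j : Int)] else []) ++
  (if mid + (j : Int) ≠ mid - (j : Int) ∧ 0 ≤ mid + (j : Int) ∧ mid + (j : Int) < height
    then [mid + (j : Int)] else [])

-- the order list after k iterations of A's loop
def pvP (mid height : Int) (k : Nat) : List Int := (List.range k).flatMap (pvSeg mid height)

-- number of iterations A's loop performs (for height >= 1)
def pvK (mid height : Int) : Nat := (max (mid + 1) (height - mid)).toNat

lemma spreadStep_eq (mid height : Int) (order : List Int) (j : Nat) :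
    spreadStep mid height order (j : Int) = order ++ pvSeg mid height j := by
  unfold spreadStep pvSeg
  by_cases h1 : 0 ≤ mid - (j : Int) ∧ mid - (j : Int) < height <;>
    by_cases h2 : mid + (j : Int) ≠ mid - (j : Int) ∧ 0 ≤ mid + (j : Int) ∧ mid + (j : Int) < height <;>
    simp [h1, h2] <;> split_ifs <;> simp

lemma pvP_succ (mid height : Int) (k : Nat) :
    pvP mid height (k + 1) = pvP mid height k ++ pvSeg mid height k := by
  simp [pvP, List.range_succ]

lemma key_left (mid : Int) (j : Nat) : pvKey mid (mid - (j : Int)) = 2 * (j : Int) - 1 := by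
  unfold pvKey
  have h : |mid - (j : Int) - mid| = (j : Int) := by
    rw [abs_eq (by positivity)]; omega
  rw [h, if_pos (by omega)]

lemma key_right (mid : Int) (j : Nat) (hj : 1 ≤ j) : pvKey mid (mid + (j : Int)) = 2 * (j : Int) := by
  unfold pvKey
  have hj' : (1 : Int) ≤ (j : Int) := by exact_mod_cast hj
  have h : |mid + (j : Int) - mid| = (j : Int) := by
    rw [abs_eq (by omega)]; omega
  rw [h, if_neg (by omega)]; ring

lemma pvSeg_pairwise (mid height : Int) (k : Nat) :
    (pvSeg mid height k).Pairwise (fun a b => pvKey mid a < pvKey mid b) := by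
  unfold pvSeg
  split_ifs with h1 h2 h2
  · have hk1 : 1 ≤ k := by
      by_contra hk
      have hk0 : k = 0 := by omega
      subst hk0; simp at h2
    simp only [List.cons_append, List.nil_append]
    refine List.pairwise_cons.2 ⟨?_, by simp⟩
    intro y hy
    simp only [List.mem_cons, List.not_mem_nil, or_false] at hy
    subst hy
    rw [key_left, key_right mid k hk1]
    omega
  all_goals simp

lemma pvSeg_key_mem (mid height : Int) (k : Nat) (x : Int) (hx : x ∈ pvSeg mid height k) :
    pvKey mid x = 2 * (k : Int) - 1 ∨ pvKey mid x = 2 * (k : Int) := by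
  unfold pvSeg at hx
  rcases List.mem_append.1 hx with h | h
  · split_ifs at h with hc
    · simp only [List.mem_singleton] at h; subst h
      exact Or.inl (key_left mid k)
    · simp at h
  · split_ifs at h with hc
    · have hk1 : 1 ≤ k := by
        by_contra hk
        have hk0 : k = 0 := by omega
        subst hk0; simp at hc
      simp only [List.mem_singleton] at h; subst h
      exact Or.inr (key_right mid k hk1)
    · simp at h

lemma pvP_invariant (mid height : Int) (k : Nat) :
    (pvP mid height k).Pairwise (fun a b => pvKey mid a < pvKey mid b) ∧
    ∀ x ∈ pvP mid height k, pvKey mid x < 2 * (k : Int) - 1 := by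
  induction k with
  | zero => simp [pvP]
  | succ k ih =>
    obtain ⟨hp, hb⟩ := ih
    constructor
    · rw [pvP_succ]
      refine List.pairwise_append.2 ⟨hp, pvSeg_pairwise mid height k, ?_⟩
      intro x hx y hy
      have h1 := hb x hx
      rcases pvSeg_key_mem mid height k y hy with h | h <;> omega
    · intro x hx
      rw [pvP_succ, List.mem_append] at hx
      rcases hx with hx | hx
      · have := hb x hx; omega
      · rcases pvSeg_key_mem mid height k x hx with h | h <;> omega

lemma pvP_nodup (mid height : Int) (k : Nat) : (pvP mid height k).Nodup :=
  (pvP_invariant mid height k).1.imp (fun h => by intro he; subst he; omega)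

lemma mem_pvP (mid height : Int) (k : Nat) (x : Int) :
    x ∈ pvP mid height k ↔ ∃ j < k, x ∈ pvSeg mid height j := by
  simp [pvP, List.mem_flatMap]

lemma pvSeg_nil_of_ge (mid height : Int) (hm0 : 0 ≤ mid) (j : Nat)
    (hj : pvK mid height ≤ j) : pvSeg mid height j = [] := by
  unfold pvK at hj
  unfold pvSeg
  rw [if_neg (by omega), if_neg (by omega)]
  rfl

lemma pvP_stable (mid height : Int) (hm0 : 0 ≤ mid) (k : Nat)
    (hk : pvK mid height ≤ k) : pvP mid height k = pvP mid height (pvK mid height) := by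
  induction k with
  | zero =>
    have hk0 : pvK mid height = 0 := by omega
    rw [hk0]
  | succ k ih =>
    rcases Nat.lt_or_ge (pvK mid height) (k + 1) with h | h
    · rw [pvP_succ, pvSeg_nil_of_ge mid height hm0 k (by omega), List.append_nil]
      exact ih (by omega)
    · have hk1 : pvK mid height = k + 1 := by omega
      rw [hk1]

lemma pvP_length (mid height : Int) (hh : 1 ≤ height) (hm0 : 0 ≤ mid) (hm1 : mid < height)
    (k : Nat) :
    ((pvP mid height k).length : Int) =
      min (k : Int) (mid + 1) + min (k : Int) (height - mid) - min (k : Int) 1 := by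
  induction k with
  | zero =>
    simp only [pvP, List.range_zero, List.flatMap_nil, List.length_nil, Nat.cast_zero]
    omega
  | succ k ih =>
    rw [pvP_succ, List.length_append]
    unfold pvSeg
    split_ifs with h1 h2 h2 <;>
      simp only [List.length_append, List.length_cons, List.length_nil] <;>
      push_cast <;> push_cast at ih <;> omega

lemma spreadLoop_inv (mid height : Int) (hh : 1 ≤ height) (hm0 : 0 ≤ mid) (hm1 : mid < height) :
    ∀ (fuel k : Nat), pvK mid height ≤ k + fuel →
      spreadLoop mid height fuel (pvP mid height k) (k : Int) =
        pvP mid height (pvK mid height) := by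
  intro fuel
  induction fuel with
  | zero =>
    intro k hk
    exact pvP_stable mid height hm0 k (by omega)
  | succ fuel ih =>
    intro k hk
    by_cases hc : ((pvP mid height k).length : Int) < height
    · rw [spreadLoop, if_pos hc, spreadStep_eq, ← pvP_succ]
      have hcast : ((k : Int) + 1) = ((k + 1 : Nat) : Int) := by push_cast; ring
      rw [hcast]
      exact ih (k + 1) (by omega)
    · rw [spreadLoop, if_neg hc]
      have hl := pvP_length mid height hh hm0 hm1 k
      have hkK : pvK mid height ≤ k := by unfold pvK; omega
      exact pvP_stable mid height hm0 k hkK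

lemma mem_pvP_full (mid height : Int) (_hh : 1 ≤ height) (hm0 : 0 ≤ mid) (hm1 : mid < height)
    (x : Int) : x ∈ pvP mid height (pvK mid height) ↔ 0 ≤ x ∧ x < height := by
  rw [mem_pvP]
  constructor
  · rintro ⟨j, _, hx⟩
    unfold pvSeg at hx
    rcases List.mem_append.1 hx with h | h
    · split_ifs at h with hc
      · simp only [List.mem_singleton] at h; subst h; exact ⟨hc.1, hc.2⟩
      · simp at h
    · split_ifs at h with hc
      · simp only [List.mem_singleton] at h; subst h; exact ⟨hc.2.1, hc.2.2⟩
      · simp at h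
  · rintro ⟨hx0, hx1⟩
    rcases le_or_gt x mid with hle | hgt
    · refine ⟨(mid - x).toNat, by unfold pvK; omega, ?_⟩
      unfold pvSeg
      apply List.mem_append_left
      rw [if_pos ⟨by omega, by omega⟩]
      simp only [List.mem_singleton]
      omega
    · refine ⟨(x - mid).toNat, by unfold pvK; omega, ?_⟩
      unfold pvSeg
      apply List.mem_append_right
      rw [if_pos ⟨by omega, by omega, by omega⟩]
      simp only [List.mem_singleton]
      omega

lemma sorted_eq_pvP (mid height : Int) (hh : 1 ≤ height) (hm0 : 0 ≤ mid) (hm1 : mid < height) :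
    PySem.List.sorted (PySem.List.pyRange 0 height 1) (pvKey mid) false =
      pvP mid height (pvK mid height) := by
  apply PySem.List.sorted_eq_of_perm_of_pairwise_lt
  · rw [List.perm_ext_iff_of_nodup (pvP_nodup mid height _)
      (PySem.List.nodup_pyRange_one 0 height)]
    intro x
    rw [mem_pvP_full mid height hh hm0 hm1, PySem.List.mem_pyRange_one]
  · exact (pvP_invariant mid height (pvK mid height)).1

-- ===== VERDICT (by name: the statement is the Claim_ definition above) =====
theorem spread_rows_py_spec : Claim_equal_spread_rows_py := by
  intro n height _
  unfold Spec_spread_rows_py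
  by_cases hn : n ≤ 0
  · simp [spread_rows_py, spread_rows_py_alt, hn]
  · rcases le_or_gt height 0 with hh | hh
    · have h0 : height.toNat = 0 := by omega
      simp [spread_rows_py, spread_rows_py_alt, hn, h0,
        PySem.List.pyRange_one_eq_nil hh, spreadLoop, PySem.List.sorted]
    · have hm := PySem.Int.floordiv_eq_ediv_of_pos (a := height) (b := 2) (by norm_num)
      simp only [spread_rows_py, spread_rows_py_alt, if_neg hn]
      set mid := PySem.Int.floordiv height 2 with hmid
      have hm0 : 0 ≤ mid := by omega
      have hm1 : mid < height := by omega
      have hK : pvK mid height ≤ height.toNat := by unfold pvK; omega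
      have hA : spreadLoop mid height height.toNat [] 0 = pvP mid height (pvK mid height) := by
        have h := spreadLoop_inv mid height (by omega) hm0 hm1 height.toNat 0 (by omega)
        simpa [pvP] using h
      rw [hA, show (fun r => 2 * |r - mid| - (if r ≤ mid then 1 else 0)) = pvKey mid from rfl,
        sorted_eq_pvP mid height (by omega) hm0 hm1]
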